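-- pv_equiv track=rewrite | github.com/stefsoliveira/probcomp-1 | batalhaNaval.py | checkShots
-- ===== SOURCE A (Python) =====
-- def checkShots(ships, shots):
--     shipsLife = []
--     for ship in range(len(ships)):
--         shipsLife.append(len(ships[ship]))
--         for coordinate in range(len(ships[ship])):
--             for shot in range(len(shots)):
--                 if ships[ship][coordinate] == shots[shot]:
--                     shipsLife[ship] = shipsLife[ship] - 1
--     return shipsLife
-- ===== SOURCE B (Python) =====
-- def checkShots(ships, shots):
--     life = [len(ship) for ship in ships]
--     index = {}
--     for i, ship in enumerate(ships):
--         for c in ship: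
--             index.setdefault(c, []).append(i)
--     for s in shots:
--         for i in index.get(s, []):
--             life[i] -= 1
--     return life
-- ===== Notes on version B (the rewrite author's own statement) =====
-- stated objective: alternative
-- what changed: Replaces A's ship-driven triple nested scan by an inverted index (coordinate value -> list of ship indices, built in one pass); the main loop is then driven by the shots, decrementing the life entry of each ship index listed under the shot's value, with no per-coordinate scan of the shots.
import Mathlib
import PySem

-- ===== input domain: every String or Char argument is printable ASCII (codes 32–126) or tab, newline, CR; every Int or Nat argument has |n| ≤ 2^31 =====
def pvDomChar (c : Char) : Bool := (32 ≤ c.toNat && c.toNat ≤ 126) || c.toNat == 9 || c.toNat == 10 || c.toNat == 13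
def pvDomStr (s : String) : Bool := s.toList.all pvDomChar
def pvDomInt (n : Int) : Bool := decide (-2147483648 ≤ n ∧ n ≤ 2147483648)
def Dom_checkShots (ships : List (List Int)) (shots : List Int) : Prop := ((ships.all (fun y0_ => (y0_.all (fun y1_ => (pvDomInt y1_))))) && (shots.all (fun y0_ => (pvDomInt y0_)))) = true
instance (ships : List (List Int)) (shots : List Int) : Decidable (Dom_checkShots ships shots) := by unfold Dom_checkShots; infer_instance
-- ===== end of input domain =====

-- B replaces A's ship-driven triple nested scan by an inverted index (value -> ship indices) whose
-- main loop is driven by the shots, decrementing the listed life entries (alternative algorithm).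

-- ===== PORT A =====
def checkShots (ships : List (List Int)) (shots : List Int) : List Int :=
  (PySem.List.pyRange 0 (ships.length : Int) 1).foldl (fun life shipI =>
    let life1 := life ++ [((PySem.List.pyGetD ships shipI []).length : Int)]
    (PySem.List.pyRange 0 ((PySem.List.pyGetD ships shipI []).length : Int) 1).foldl (fun life2 coordI =>
      (PySem.List.pyRange 0 (shots.length : Int) 1).foldl (fun life3 shotI =>
        if PySem.List.pyGetD (PySem.List.pyGetD ships shipI []) coordI 0 == PySem.List.pyGetD shots shotI 0
        then PySem.List.pySetD life3 shipI (PySem.List.pyGetD life3 shipI 0 - 1)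
        else life3) life2) life1) []

-- ===== PORT B =====
def checkShots_alt (ships : List (List Int)) (shots : List Int) : List Int :=
  let life0 := ships.map (fun ship => (ship.length : Int))
  let index : PySem.Dict Int (List Int) :=
    (PySem.List.enumerate ships).foldl
      (fun d p => p.2.foldl (fun d c => d.insert c (d.getD c [] ++ [p.1])) d)
      PySem.Dict.empty
  shots.foldl (fun life s =>
    (index.getD s []).foldl
      (fun l i => PySem.List.pySetD l i (PySem.List.pyGetD l i 0 - 1)) life) life0

-- ===== PRECONDITION & SPEC =====
def Spec_checkShots (ships : List (List Int)) (shots : List Int) (out : List Int) : Prop := out = checkShots_alt ships shots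
instance (ships : List (List Int)) (shots : List Int) (out : List Int) : Decidable (Spec_checkShots ships shots out) := by unfold Spec_checkShots; infer_instance

-- ===== CLAIM (what is proved, stated in full; the proofs are below) =====
def Claim_equal_checkShots : Prop := ∀ (ships : List (List Int)) (shots : List Int), Dom_checkShots ships shots → Spec_checkShots ships shots (checkShots ships shots)

-- ===== LEMMAS AND PROOFS =====

-- the common normal form both ports reach
def pvTarget (ships : List (List Int)) (shots : List Int) : List Int :=
  ships.map (fun row => (row.length : Int) - (row.map (fun c => (shots.count c : Int))).sum)

-- ---------- A side ----------

lemma shots_loop (c : Int) (shots : List Int) : ∀ (life : List Int) (n : Nat), n < life.length →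
    shots.foldl (fun l3 s => if c == s then l3.set n (l3.getD n 0 - 1) else l3) life
      = life.set n (life.getD n 0 - shots.count c) := by
  induction shots with
  | nil =>
    intro life n h
    rw [List.foldl_nil, List.getD_eq_getElem?_getD, List.getElem?_eq_getElem h]
    simp
  | cons s rest ih =>
    intro life n h
    simp only [List.foldl_cons]
    by_cases hc : c = s
    · subst hc
      rw [if_pos (by simp)]
      rw [ih _ n (by simpa using h)]
      rw [List.set_set]
      congr 1
      rw [List.getD_eq_getElem?_getD, List.getElem?_set_self (by simpa using h)]
      simp [List.getD_eq_getElem?_getD]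
      omega
    · rw [if_neg (by simpa using hc)]
      rw [ih _ n h]
      congr 1
      simp [Ne.symm hc]

lemma coord_loop (shots row : List Int) : ∀ (life : List Int) (n : Nat), n < life.length →
    row.foldl (fun l2 c =>
        List.foldl (fun l3 shotI =>
          if c == PySem.List.pyGetD shots shotI 0 then l3.set n (l3.getD n 0 - 1) else l3)
          l2 (PySem.List.pyRange 0 ((shots.length : Int)) 1)) life
      = life.set n (life.getD n 0 - (row.map (fun c => (shots.count c : Int))).sum) := by
  induction row with
  | nil =>
    intro life n h
    rw [List.foldl_nil, List.getD_eq_getElem?_getD, List.getElem?_eq_getElem h]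
    simp
  | cons c rest ih =>
    intro life n h
    simp only [List.foldl_cons]
    rw [PySem.List.foldl_pyRange_zero_pyGetD' shots 0
      (fun l3 s => if c == s then l3.set n (l3.getD n 0 - 1) else l3) life]
    rw [shots_loop c shots life n h]
    rw [ih _ n (by simpa using h)]
    rw [List.set_set]
    congr 1
    rw [List.getD_eq_getElem?_getD, List.getElem?_set_self (by simpa using h)]
    simp [List.getD_eq_getElem?_getD]
    ring

lemma set_append_last (life : List Int) (v w : Int) :
    (life ++ [v]).set life.length w = life ++ [w] := by
  rw [List.set_append_right _ _ (le_refl _)]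
  simp

lemma getD_append_last (life : List Int) (v : Int) :
    (life ++ [v]).getD life.length 0 = v := by
  rw [List.getD_eq_getElem?_getD, List.getElem?_append_right (le_refl _)]
  simp

lemma pyGetD_append_left {α : Type} (l t : List α) (i : Int) (d : α)
    (h0 : 0 ≤ i) (h1 : i < l.length) :
    PySem.List.pyGetD (l ++ t) i d = PySem.List.pyGetD l i d := by
  rw [PySem.List.pyGetD_eq_getElem (l ++ t) d h0 (by simp; omega),
      PySem.List.pyGetD_eq_getElem l d h0 h1]
  rw [List.getElem_append_left]

lemma outer_step (row shots life : List Int) :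
    List.foldl (fun life2 coordI =>
      List.foldl (fun life3 shotI =>
        if PySem.List.pyGetD row coordI 0 == PySem.List.pyGetD shots shotI 0
        then PySem.List.pySetD life3 ((life.length : Int)) (PySem.List.pyGetD life3 ((life.length : Int)) 0 - 1)
        else life3) life2 (PySem.List.pyRange 0 ((shots.length : Int)) 1))
      (life ++ [(row.length : Int)]) (PySem.List.pyRange 0 ((row.length : Int)) 1)
    = life ++ [(row.length : Int) - (row.map (fun c => (shots.count c : Int))).sum] := by
  simp only [PySem.List.pySetD_natCast, PySem.List.pyGetD_natCast]
  rw [PySem.List.foldl_pyRange_zero_pyGetD' row 0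
    (fun l2 c => List.foldl (fun l3 shotI =>
      if c == PySem.List.pyGetD shots shotI 0
      then l3.set life.length ((l3.getD life.length 0) - 1) else l3)
      l2 (PySem.List.pyRange 0 ((shots.length : Int)) 1))
    (life ++ [(row.length : Int)])]
  rw [coord_loop shots row (life ++ [(row.length : Int)]) life.length (by simp)]
  rw [set_append_last, getD_append_last]

lemma checkShots_eq_target (ships : List (List Int)) (shots : List Int) :
    checkShots ships shots = pvTarget ships shots := by
  induction ships using List.reverseRecOn with
  | nil => simp [checkShots, pvTarget, PySem.List.pyRange_one_eq_nil (le_refl 0)]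
  | append_singleton l row ih =>
    unfold checkShots
    have hlen : (((l ++ [row]).length : Nat) : Int) = (l.length : Int) + 1 := by simp
    rw [hlen, PySem.List.pyRange_one_succ_right (by positivity), List.foldl_append]
    rw [PySem.List.foldl_congr_mem _ _
      (fun life shipI =>
        List.foldl (fun life2 coordI =>
          List.foldl (fun life3 shotI =>
            if PySem.List.pyGetD (PySem.List.pyGetD l shipI []) coordI 0 == PySem.List.pyGetD shots shotI 0
            then PySem.List.pySetD life3 shipI (PySem.List.pyGetD life3 shipI 0 - 1)
            else life3) life2 (PySem.List.pyRange 0 ((shots.length : Int)) 1))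
          (life ++ [((PySem.List.pyGetD l shipI []).length : Int)])
          (PySem.List.pyRange 0 (((PySem.List.pyGetD l shipI []).length : Int)) 1)) []
      (by
        intro acc x hx
        have hxr := PySem.List.mem_pyRange_one.mp hx
        rw [pyGetD_append_left l [row] x [] hxr.1 (by exact_mod_cast hxr.2)])]
    have hpre : List.foldl (fun life shipI =>
        List.foldl (fun life2 coordI =>
          List.foldl (fun life3 shotI =>
            if PySem.List.pyGetD (PySem.List.pyGetD l shipI []) coordI 0 == PySem.List.pyGetD shots shotI 0
            then PySem.List.pySetD life3 shipI (PySem.List.pyGetD life3 shipI 0 - 1)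
            else life3) life2 (PySem.List.pyRange 0 ((shots.length : Int)) 1))
          (life ++ [((PySem.List.pyGetD l shipI []).length : Int)])
          (PySem.List.pyRange 0 (((PySem.List.pyGetD l shipI []).length : Int)) 1)) []
        (PySem.List.pyRange 0 ((l.length : Int)) 1) = checkShots l shots := rfl
    rw [hpre, ih, List.foldl_cons, List.foldl_nil]
    have hrow : PySem.List.pyGetD (l ++ [row]) ((l.length : Int)) [] = row := by
      rw [PySem.List.pyGetD_eq_getElem (l ++ [row]) [] (by positivity) (by simp)]
      simp
    rw [hrow]
    have hlen2 : (pvTarget l shots).length = l.length := by simp [pvTarget]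
    have hstep := outer_step row shots (pvTarget l shots)
    rw [hlen2] at hstep
    rw [hstep]
    simp [pvTarget]

-- ---------- B side ----------

-- the value of one index entry after folding one row (every append adds the same tag m)
lemma inner_fold (row : List Int) : ∀ (d : PySem.Dict Int (List Int)) (m v : Int),
    ((row.foldl (fun d c => d.insert c (d.getD c [] ++ [m])) d).getD v [])
      = d.getD v [] ++ List.replicate (row.count v) m := by
  induction row with
  | nil => intro d m v; simp
  | cons c rest ih =>
    intro d m v
    simp only [List.foldl_cons]
    rw [ih]
    rw [PySem.Dict.getD_insert]
    by_cases hv : v = c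
    · subst hv
      rw [if_pos rfl]
      simp [List.count_cons_self, List.replicate_succ, List.append_assoc]
    · rw [if_neg hv]
      have hcv : ¬ c = v := fun hh => hv hh.symm
      simp [hcv]

-- the whole index entry for value v is the ship indices in order, each repeated by its row's count of v
lemma index_entry (ships : List (List Int)) : ∀ (d : PySem.Dict Int (List Int)) (s v : Int),
    (((PySem.List.enumerate ships s).foldl
        (fun d p => p.2.foldl (fun d c => d.insert c (d.getD c [] ++ [p.1])) d) d).getD v [])
      = d.getD v [] ++
        (List.range ships.length).flatMap
          (fun k => List.replicate ((ships.getD k []).count v) (s + k)) := by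
  induction ships with
  | nil => intro d s v; simp [PySem.List.enumerate_nil]
  | cons row rest ih =>
    intro d s v
    rw [PySem.List.enumerate_cons, List.foldl_cons]
    rw [ih]
    rw [inner_fold]
    simp only [List.length_cons]
    rw [List.range_succ_eq_map, List.flatMap_cons, List.flatMap_map]
    simp only [List.getD_cons_zero, List.getD_cons_succ, Int.natCast_zero, add_zero]
    rw [List.append_assoc]
    refine congrArg₂ (· ++ ·) rfl (congrArg₂ (· ++ ·) (by simp) ?_)
    apply List.flatMap_congr
    intro k _
    congr 1
    push_cast
    ring

lemma entry_count (ships : List (List Int)) (v : Int) : ∀ (n : Nat) (j : Nat), j < n →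
    (((List.range n).flatMap
        (fun k => List.replicate ((ships.getD k []).count v) ((0:Int) + k))).count ((j:Nat) : Int))
      = (ships.getD j []).count v := by
  intro n
  induction n with
  | zero => intro j h; omega
  | succ n ih =>
    intro j hj
    rw [List.range_succ, List.flatMap_append, List.count_append]
    simp only [List.flatMap_cons, List.flatMap_nil, List.append_nil]
    rw [List.count_replicate]
    by_cases h : j = n
    · subst h
      have : ((List.range j).flatMap
          (fun k => List.replicate ((ships.getD k []).count v) ((0:Int) + k))).count ((j:Nat) : Int) = 0 := by
        rw [List.count_eq_zero]
        intro hmem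
        obtain ⟨k, hk, hrep⟩ := List.mem_flatMap.mp hmem
        have := List.eq_of_mem_replicate hrep
        have hk' : k < j := List.mem_range.mp hk
        omega
      rw [this, if_pos (by simp)]
      omega
    · rw [ih j (by omega), if_neg (by simp; omega)]
      omega

lemma entry_mem (ships : List (List Int)) (v : Int) (n : Nat) (i : Int)
    (h : i ∈ (List.range n).flatMap
        (fun k => List.replicate ((ships.getD k []).count v) ((0:Int) + k))) :
    ∃ k : Nat, k < n ∧ i = (k : Int) := by
  obtain ⟨k, hk, hrep⟩ := List.mem_flatMap.mp h
  exact ⟨k, List.mem_range.mp hk, by simpa using List.eq_of_mem_replicate hrep⟩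

-- decrement-per-listed-index fold, pointwise
lemma dec_fold (m : Nat) : ∀ (L : List Int), (∀ i ∈ L, ∃ k : Nat, k < m ∧ i = (k : Int)) →
    ∀ (life : List Int), life.length = m →
      (L.foldl (fun l i => PySem.List.pySetD l i (PySem.List.pyGetD l i 0 - 1)) life).length = m ∧
      ∀ j : Nat, j < m →
        (L.foldl (fun l i => PySem.List.pySetD l i (PySem.List.pyGetD l i 0 - 1)) life).getD j 0
          = life.getD j 0 - (L.count ((j:Nat) : Int) : Int) := by
  intro L
  induction L with
  | nil => intro _ life hlen; exact ⟨hlen, by intro j hj; simp⟩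
  | cons i rest ih =>
    intro hL life hlen
    obtain ⟨k, hk, hik⟩ := hL i (by simp)
    subst hik
    simp only [List.foldl_cons, PySem.List.pySetD_natCast, PySem.List.pyGetD_natCast]
    have hlen' : (life.set k (life.getD k 0 - 1)).length = m := by simpa using hlen
    obtain ⟨hL1, hL2⟩ := ih (fun x hx => hL x (by simp [hx])) (life.set k (life.getD k 0 - 1)) hlen'
    refine ⟨hL1, fun j hj => ?_⟩
    rw [hL2 j hj]
    by_cases hjk : j = k
    · subst hjk
      rw [List.getD_eq_getElem?_getD, List.getElem?_set_self (by omega)]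
      rw [List.count_cons, if_pos (by simp)]
      simp [List.getD_eq_getElem?_getD]
      omega
    · rw [List.getD_eq_getElem?_getD, List.getElem?_set_ne (by omega)]
      rw [List.count_cons, if_neg (by simp; omega)]
      simp [List.getD_eq_getElem?_getD]

-- Σ_{s ∈ shots} row.count s = Σ_{c ∈ row} shots.count c (both count the matching pairs)
lemma count_one (shots : List Int) (c : Int) :
    ((shots.map (fun s => if s = c then (1:Int) else 0)).sum) = (shots.count c : Int) := by
  induction shots with
  | nil => simp
  | cons s rest ih =>
    simp only [List.map_cons, List.sum_cons, ih, List.count_cons]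
    push_cast
    by_cases h : s = c
    · simp [h]; ring
    · simp [h]

lemma sum_swap (shots : List Int) : ∀ (row : List Int),
    ((shots.map (fun s => (row.count s : Int))).sum) = ((row.map (fun c => (shots.count c : Int))).sum) := by
  intro row
  induction row with
  | nil => simp
  | cons c rest ih =>
    simp only [List.map_cons, List.sum_cons]
    have : (shots.map (fun s => (((c :: rest).count s : Nat) : Int))) =
        (shots.map (fun s => (rest.count s : Int) + (if s = c then (1:Int) else 0))) := by
      apply List.map_congr_left
      intro s _
      rw [List.count_cons]
      push_cast
      by_cases h : s = c
      · simp [h]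
      · simp [h]
        exact Ne.symm h
    rw [this, PySem.List.sum_map_add_int, ih, count_one]
    ring

lemma shots_fold (ships : List (List Int)) (entry : Int → List Int)
    (hmem : ∀ s : Int, ∀ i ∈ entry s, ∃ k : Nat, k < ships.length ∧ i = (k : Int)) :
    ∀ (shotsl life : List Int), life.length = ships.length →
      (shotsl.foldl (fun life s => (entry s).foldl
          (fun l i => PySem.List.pySetD l i (PySem.List.pyGetD l i 0 - 1)) life) life).length = ships.length ∧
      ∀ j : Nat, j < ships.length →
        (shotsl.foldl (fun life s => (entry s).foldl
            (fun l i => PySem.List.pySetD l i (PySem.List.pyGetD l i 0 - 1)) life) life).getD j 0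
          = life.getD j 0 - (shotsl.map (fun s => ((entry s).count ((j:Nat) : Int) : Int))).sum := by
  intro shotsl
  induction shotsl with
  | nil => intro life hlen; exact ⟨hlen, by intro j hj; simp⟩
  | cons s rest ih =>
    intro life hlen
    simp only [List.foldl_cons]
    obtain ⟨hd1, hd2⟩ := dec_fold ships.length (entry s) (hmem s) life hlen
    obtain ⟨hr1, hr2⟩ := ih _ hd1
    refine ⟨hr1, fun j hj => ?_⟩
    rw [hr2 j hj, hd2 j hj]
    simp only [List.map_cons, List.sum_cons]
    ring

lemma checkShots_alt_eq_target (ships : List (List Int)) (shots : List Int) :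
    checkShots_alt ships shots = pvTarget ships shots := by
  unfold checkShots_alt
  have hentry : ∀ v : Int,
      (((PySem.List.enumerate ships).foldl
          (fun d p => p.2.foldl (fun d c => d.insert c (d.getD c [] ++ [p.1])) d)
          PySem.Dict.empty).getD v [])
        = (List.range ships.length).flatMap
            (fun k => List.replicate ((ships.getD k []).count v) ((0:Int) + k)) := by
    intro v
    rw [show PySem.List.enumerate ships = PySem.List.enumerate ships 0 from rfl,
        index_entry ships PySem.Dict.empty 0 v]
    simp
  have hmem : ∀ s : Int, ∀ i ∈ (((PySem.List.enumerate ships).foldl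
          (fun d p => p.2.foldl (fun d c => d.insert c (d.getD c [] ++ [p.1])) d)
          PySem.Dict.empty).getD s []),
        ∃ k : Nat, k < ships.length ∧ i = (k : Int) := by
    intro s i hi
    rw [hentry s] at hi
    exact entry_mem ships s ships.length i hi
  obtain ⟨hlen, hpt⟩ := shots_fold ships _ hmem shots
      (ships.map (fun ship => (ship.length : Int))) (by simp)
  apply List.ext_getElem (by rw [hlen]; simp [pvTarget])
  intro j hj hj'
  have hjlen : j < ships.length := by rwa [hlen] at hj
  have hget : ∀ (xs : List Int) (h : j < xs.length), xs[j] = xs.getD j 0 := by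
    intro xs h
    rw [List.getD_eq_getElem?_getD, List.getElem?_eq_getElem h]
    rfl
  rw [hget _ hj, hget _ hj', hpt j hjlen]
  have hships : ships.getD j [] = ships[j] := by
    rw [List.getD_eq_getElem?_getD, List.getElem?_eq_getElem hjlen]
    rfl
  have hmap : ((shots.map (fun s =>
        (((((PySem.List.enumerate ships).foldl
          (fun d p => p.2.foldl (fun d c => d.insert c (d.getD c [] ++ [p.1])) d)
          PySem.Dict.empty).getD s []).count ((j:Nat) : Int) : Int)))).sum)
      = ((shots.map (fun s => ((ships[j].count s : Nat) : Int))).sum) := by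
    congr 1
    apply List.map_congr_left
    intro s _
    rw [hentry s, entry_count ships s ships.length j hjlen, hships]
  rw [hmap, sum_swap]
  have hlife0 : (ships.map (fun ship => (ship.length : Int))).getD j 0 = (ships[j].length : Int) := by
    rw [List.getD_eq_getElem?_getD, List.getElem?_eq_getElem (by simpa using hjlen)]
    simp
  rw [hlife0]
  simp only [pvTarget]
  rw [List.getD_eq_getElem?_getD, List.getElem?_eq_getElem (by simpa using hjlen)]
  simp

-- ===== VERDICT (by name: the statement is the Claim_ definition above) =====
theorem checkShots_spec : Claim_equal_checkShots := by
  intro ships shots _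
  unfold Spec_checkShots
  rw [checkShots_eq_target, checkShots_alt_eq_target]
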